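-- pv_equiv track=rewrite | github.com/mvendra/mvtools | svn/svn_lib.py | detect_separator
-- ===== SOURCE A (Python) =====
-- def is_non_generic(char_input, list_select):
--     for c in list_select:
--         if c == char_input:
--             return False
--     return True
--
-- def detect_separator(the_string):
--
--     if the_string is None:
--         return None
--     if len(the_string) == 0:
--         return None
--
--     rep_char = the_string[0]
--     rep_line = ""
--     for i in range(len(the_string)):
--         if is_non_generic(the_string[i], [rep_char]):
--             rep_line = the_string[0:i]
--             return rep_line
--
--     return None
-- ===== SOURCE B (Python) =====
-- def detect_separator(the_string):
--     if the_string is None: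
--         return None
--     n = len(the_string)
--     if n == 0:
--         return None
--     c = the_string[0]
--     # binary search for the largest k such that the_string[:k] == c * k
--     lo, hi = 0, n
--     while lo < hi:
--         mid = (lo + hi + 1) // 2
--         if the_string[:mid] == c * mid:
--             lo = mid
--         else:
--             hi = mid - 1
--     if lo == n:
--         return None
--     return c * lo
-- ===== Notes on version B (the rewrite author's own statement) =====
-- stated objective: alternative
-- what changed: Replaces A's left-to-right character scan (with the is_non_generic membership helper) by a binary search over the prefix length k, testing s[:k] == s[0]*k, and builds the result as c*k instead of slicing; correct because that predicate is monotone in k.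
import Mathlib
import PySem

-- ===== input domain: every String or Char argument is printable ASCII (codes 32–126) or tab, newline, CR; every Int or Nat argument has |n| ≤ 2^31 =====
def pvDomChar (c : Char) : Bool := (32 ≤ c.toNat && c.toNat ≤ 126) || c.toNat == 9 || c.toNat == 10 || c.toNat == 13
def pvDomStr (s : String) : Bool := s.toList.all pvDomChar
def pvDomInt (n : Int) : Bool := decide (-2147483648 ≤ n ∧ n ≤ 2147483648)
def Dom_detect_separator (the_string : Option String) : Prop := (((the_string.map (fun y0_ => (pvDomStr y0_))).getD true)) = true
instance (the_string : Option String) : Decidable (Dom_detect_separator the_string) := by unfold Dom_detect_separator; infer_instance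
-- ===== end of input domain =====

-- B replaces A's left-to-right scan with a binary search over the prefix length k (testing s[:k] == c*k) and builds the result as c*k; alternative algorithm, similar cost.


-- ===== PORT A =====
-- helper: 'for c in list_select: if c == char_input: return False / return True'
def is_non_generic (char_input : Char) : List Char → Bool
  | [] => true
  | c :: rest => if c == char_input then false else is_non_generic char_input rest

-- 'for i in range(len(the_string)): if is_non_generic(the_string[i], [rep_char]): return the_string[0:i]'
-- (recursion walks the remaining characters; i counts the index; the slice s[0:i] is take i)
def detectLoopA (full : List Char) (rep_char : Char) : Nat → List Char → Option String
  | _, [] => none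
  | i, x :: rest =>
      if is_non_generic x [rep_char] then some (String.ofList (full.take i))
      else detectLoopA full rep_char (i + 1) rest

def detect_separator (the_string : Option String) : Option String :=
  match the_string with
  | none => none
  | some s =>
      match s.toList with
      | [] => none
      | rep_char :: _ => detectLoopA s.toList rep_char 0 s.toList

-- ===== PORT B =====
-- 'while lo < hi: mid = (lo+hi+1)//2; if the_string[:mid] == c*mid: lo = mid else: hi = mid-1'
-- fuel = hi - lo makes the loop structurally recursive; each iteration shrinks hi - lo by ≥ 1
def bsearchBFuel (s : List Char) (c : Char) : Nat → Nat → Nat → Nat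
  | 0, lo, _ => lo
  | fuel + 1, lo, hi =>
      if lo < hi then
        let mid := (lo + hi + 1) / 2
        if s.take mid = List.replicate mid c then
          bsearchBFuel s c fuel mid hi
        else
          bsearchBFuel s c fuel lo (mid - 1)
      else lo

def bsearchB (s : List Char) (c : Char) (lo hi : Nat) : Nat :=
  bsearchBFuel s c (hi - lo) lo hi

def detect_separator_alt (the_string : Option String) : Option String :=
  match the_string with
  | none => none
  | some s =>
      match s.toList with
      | [] => none
      | c :: _ =>
          let lo := bsearchB s.toList c 0 s.toList.length
          if lo = s.toList.length then none
          else some (String.ofList (List.replicate lo c))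

-- ===== PRECONDITION & SPEC =====
def Spec_detect_separator (the_string : Option String) (out : Option String) : Prop := out = detect_separator_alt the_string
instance (the_string : Option String) (out : Option String) : Decidable (Spec_detect_separator the_string out) := by unfold Spec_detect_separator; infer_instance

-- ===== CLAIM (what is proved, stated in full; the proofs are below) =====
def Claim_equal_detect_separator : Prop := ∀ (the_string : Option String), Dom_detect_separator the_string → Spec_detect_separator the_string (detect_separator the_string)

-- ===== LEMMAS AND PROOFS =====

theorem is_non_generic_single (x c : Char) : is_non_generic x [c] = !(c == x) := by
  simp only [is_non_generic]
  by_cases h : c = x <;> simp [h]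

-- invariant of A's loop: it yields none iff nothing differs from rep_char, else the
-- slice at index i + (length of the run of rep_char at the front of the remainder)
theorem detectLoopA_eq (full : List Char) (c : Char) :
    ∀ (l : List Char) (i : Nat),
      detectLoopA full c i l =
        if l.dropWhile (fun x => x == c) = [] then none
        else some (String.ofList (full.take (i + (l.takeWhile (fun x => x == c)).length))) := by
  intro l
  induction l with
  | nil => intro i; simp [detectLoopA]
  | cons x rest ih =>
      intro i
      by_cases hx : x = c
      · subst hx
        simp only [detectLoopA, is_non_generic_single, List.dropWhile, List.takeWhile,
          ih (i + 1), beq_self_eq_true, Bool.not_true, Bool.false_eq_true, if_false]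
        split_ifs with h
        · rfl
        · rw [List.length_cons, Nat.add_comm (List.takeWhile _ _).length 1, Nat.add_assoc]
      · have hbc : (c == x) = false := by simp [Ne.symm hx]
        have hxc : (x == c) = false := by simp [hx]
        simp [detectLoopA, is_non_generic_single, hbc, List.dropWhile, List.takeWhile, hxc]

-- the binary-search predicate is monotone: s[:k] == c*k iff k is at most the leading run of c
theorem take_eq_replicate_iff (c : Char) :
    ∀ (s : List Char) (k : Nat),
      (s.take k = List.replicate k c) ↔ k ≤ (s.takeWhile (fun x => x == c)).length := by
  intro s
  induction s with
  | nil =>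
      intro k
      cases k <;> simp [List.takeWhile]
  | cons x t ih =>
      intro k
      cases k with
      | zero => simp
      | succ k =>
          by_cases hx : x = c
          · subst hx
            simp [List.takeWhile, List.replicate_succ, ih k]
          · have hxc : (x == c) = false := by simp [hx]
            simp [List.takeWhile, hxc, List.replicate_succ, hx]

-- binary-search invariant: with enough fuel and lo ≤ run ≤ hi the loop returns run
theorem bsearchBFuel_eq (s : List Char) (c : Char) :
    ∀ (fuel lo hi : Nat), hi - lo ≤ fuel → lo ≤ (s.takeWhile (fun x => x == c)).length →
      (s.takeWhile (fun x => x == c)).length ≤ hi →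
      bsearchBFuel s c fuel lo hi = (s.takeWhile (fun x => x == c)).length := by
  intro fuel
  induction fuel with
  | zero => intro lo hi hf h1 h2; simp [bsearchBFuel]; omega
  | succ fuel ih =>
      intro lo hi hf h1 h2
      by_cases hlt : lo < hi
      · rw [bsearchBFuel, if_pos hlt]
        by_cases hp : s.take ((lo + hi + 1) / 2) = List.replicate ((lo + hi + 1) / 2) c
        · rw [if_pos hp]
          exact ih _ _ (by omega) ((take_eq_replicate_iff c s _).mp hp) h2
        · rw [if_neg hp]
          have hnp : ¬ (lo + hi + 1) / 2 ≤ (s.takeWhile (fun x => x == c)).length := fun hle =>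
            hp ((take_eq_replicate_iff c s _).mpr hle)
          exact ih _ _ (by omega) h1 (by omega)
      · rw [bsearchBFuel, if_neg hlt]
        omega

theorem bsearchB_eq (s : List Char) (c : Char) (lo hi : Nat)
    (h1 : lo ≤ (s.takeWhile (fun x => x == c)).length)
    (h2 : (s.takeWhile (fun x => x == c)).length ≤ hi) :
    bsearchB s c lo hi = (s.takeWhile (fun x => x == c)).length :=
  bsearchBFuel_eq s c (hi - lo) lo hi le_rfl h1 h2

theorem takeWhile_dropWhile_len (p : Char → Bool) (l : List Char) :
    (l.takeWhile p).length = l.length - (l.dropWhile p).length := by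
  have h : (l.takeWhile p).length + (l.dropWhile p).length = l.length := by
    rw [← List.length_append, List.takeWhile_append_dropWhile]
  omega

-- ===== VERDICT (by name: the statement is the Claim_ definition above) =====
theorem detect_separator_spec : Claim_equal_detect_separator := by
  intro the_string _
  unfold Spec_detect_separator detect_separator detect_separator_alt
  match the_string with
  | none => rfl
  | some s =>
      simp only
      match h : s.toList with
      | [] => rfl
      | c :: rest =>
          have hk : ((c :: rest).takeWhile (fun x => x == c)).length ≤ (c :: rest).length :=
            (List.takeWhile_sublist _).length_le
          show detectLoopA (c :: rest) c 0 (c :: rest) =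
            (if bsearchB (c :: rest) c 0 (c :: rest).length = (c :: rest).length then none
             else some (String.ofList (List.replicate (bsearchB (c :: rest) c 0 (c :: rest).length) c)))
          rw [detectLoopA_eq, bsearchB_eq (c :: rest) c 0 (c :: rest).length (Nat.zero_le _) hk]
          have hd : ((c :: rest).dropWhile (fun x => x == c) = []) ↔
              ((c :: rest).takeWhile (fun x => x == c)).length = (c :: rest).length := by
            rw [takeWhile_dropWhile_len]
            constructor
            · intro he; rw [he]; simp
            · intro he
              have := takeWhile_dropWhile_len (fun x => x == c) (c :: rest)
              have hdlen : ((c :: rest).dropWhile (fun x => x == c)).length = 0 := by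
                have hle : ((c :: rest).dropWhile (fun x => x == c)).length ≤ (c :: rest).length :=
                  (List.dropWhile_sublist _).length_le
                omega
              exact List.eq_nil_of_length_eq_zero hdlen
          by_cases hcase : ((c :: rest).takeWhile (fun x => x == c)).length = (c :: rest).length
          · rw [if_pos (hd.mpr hcase), if_pos hcase]
          · rw [if_neg (fun he => hcase (hd.mp he)), if_neg hcase, Nat.zero_add]
            have := (take_eq_replicate_iff c (c :: rest) ((c :: rest).takeWhile (fun x => x == c)).length).mpr le_rfl
            rw [this]
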